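-- pv_equiv track=rewrite | github.com/HoBooom/codetree-TILs | 240907/Carry 피하기 2/escaping-carry-2.py | is_carry
-- ===== SOURCE A (Python) =====
-- def is_carry(num1,num2):
--     while num1 > 0 and num2 > 0:
--
--         n1 = num1 % 10
--         n2 = num2 % 10
--         if n1 + n2 >= 10:
--             return True
--         num1 //= 10
--         num2 //= 10
--     return False
-- ===== SOURCE B (Python) =====
-- def digit_sum(n):
--     s = 0
--     while n > 0:
--         s += n % 10
--         n //= 10
--     return s
--
-- def is_carry(num1, num2):
--     # A carry in decimal addition reduces the digit sum by exactly 9, so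
--     # digit_sum(a) + digit_sum(b) - digit_sum(a + b) == 9 * (number of carries).
--     if num1 <= 0 or num2 <= 0:
--         return False
--     return digit_sum(num1) + digit_sum(num2) != digit_sum(num1 + num2)
-- ===== Notes on version B (the rewrite author's own statement) =====
-- stated objective: alternative
-- what changed: Replaces the per-digit-pair while-loop by the digit-sum invariant: a carry occurs iff digit_sum(a)+digit_sum(b) != digit_sum(a+b) (each carry lowers the digit sum by 9), computed with three digit-sum passes and one comparison.
import Mathlib
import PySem

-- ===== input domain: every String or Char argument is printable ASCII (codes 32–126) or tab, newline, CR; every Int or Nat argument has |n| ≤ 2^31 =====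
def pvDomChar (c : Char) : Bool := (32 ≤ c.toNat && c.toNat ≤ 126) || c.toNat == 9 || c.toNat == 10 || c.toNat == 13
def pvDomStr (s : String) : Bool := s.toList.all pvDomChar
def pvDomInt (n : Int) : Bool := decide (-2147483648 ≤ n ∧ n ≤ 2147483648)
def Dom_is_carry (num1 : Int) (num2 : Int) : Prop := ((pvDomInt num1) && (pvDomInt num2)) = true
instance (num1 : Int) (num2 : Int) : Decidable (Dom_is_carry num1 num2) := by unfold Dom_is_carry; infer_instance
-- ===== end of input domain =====

-- ===== PORT A =====
-- B replaces A's per-digit-pair scan by the digit-sum invariant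
-- digit_sum(a)+digit_sum(b) != digit_sum(a+b) (alternative; same cost).
def is_carry (num1 : Int) (num2 : Int) : Bool :=
  if num1 > 0 && num2 > 0 then
    let n1 := PySem.Int.mod num1 10
    let n2 := PySem.Int.mod num2 10
    if n1 + n2 >= 10 then true
    else is_carry (PySem.Int.floordiv num1 10) (PySem.Int.floordiv num2 10)
  else false
termination_by num1.toNat
decreasing_by
  simp only [Bool.and_eq_true, decide_eq_true_eq] at *
  have : PySem.Int.floordiv num1 10 < num1 := by
    simp [PySem.Int.floordiv, Int.fdiv_eq_ediv]
    omega
  omega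

-- ===== PORT B =====
-- Source B's digit_sum accumulator loop, tail-recursively
def digit_sum_loop (n : Int) (s : Int) : Int :=
  if n > 0 then digit_sum_loop (PySem.Int.floordiv n 10) (s + PySem.Int.mod n 10)
  else s
termination_by n.toNat
decreasing_by
  have : PySem.Int.floordiv n 10 < n := by
    simp [PySem.Int.floordiv, Int.fdiv_eq_ediv]
    omega
  omega

def digit_sum (n : Int) : Int := digit_sum_loop n 0

def is_carry_alt (num1 : Int) (num2 : Int) : Bool :=
  if num1 <= 0 || num2 <= 0 then false
  else decide (digit_sum num1 + digit_sum num2 ≠ digit_sum (num1 + num2))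

-- ===== PRECONDITION & SPEC =====
def Spec_is_carry (num1 : Int) (num2 : Int) (out : Bool) : Prop := out = is_carry_alt num1 num2
instance (num1 : Int) (num2 : Int) (out : Bool) : Decidable (Spec_is_carry num1 num2 out) := by unfold Spec_is_carry; infer_instance

-- ===== CLAIM (what is proved, stated in full; the proofs are below) =====
def Claim_equal_is_carry : Prop := ∀ (num1 : Int) (num2 : Int), Dom_is_carry num1 num2 → Spec_is_carry num1 num2 (is_carry num1 num2)

-- ===== LEMMAS AND PROOFS =====

-- digit sum over Nat, the proof-side model
def ds (n : Nat) : Nat :=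
  if n = 0 then 0 else n % 10 + ds (n / 10)

theorem ds_mul10_add (q r : Nat) (hr : r < 10) : ds (10 * q + r) = r + ds q := by
  by_cases h : 10 * q + r = 0
  · have hq : q = 0 := by omega
    have hr0 : r = 0 := by omega
    simp [ds, hq, hr0]
  · rw [ds, if_neg h]
    have h1 : (10 * q + r) % 10 = r := by omega
    have h2 : (10 * q + r) / 10 = q := by omega
    rw [h1, h2]

theorem ds_succ_le (n : Nat) : ds (n + 1) ≤ ds n + 1 := by
  induction n using Nat.strong_induction_on with
  | _ n ih =>
    by_cases h9 : n % 10 = 9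
    · have hn : 0 < n := by omega
      have e : n + 1 = 10 * (n / 10 + 1) + 0 := by omega
      have e2 : n = 10 * (n / 10) + 9 := by omega
      rw [e, ds_mul10_add _ _ (by omega)]
      conv_rhs => rw [e2, ds_mul10_add _ _ (by omega)]
      have := ih (n / 10) (by omega)
      omega
    · have e : n + 1 = 10 * (n / 10) + (n % 10 + 1) := by omega
      have e2 : n = 10 * (n / 10) + n % 10 := by omega
      rw [e, ds_mul10_add _ _ (by omega)]
      conv_rhs => rw [e2, ds_mul10_add _ _ (by omega)]
      omega

theorem ds_add_le (x : Nat) : ∀ y : Nat, ds (x + y) ≤ ds x + ds y := by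
  induction x using Nat.strong_induction_on with
  | _ x ih =>
    intro y
    by_cases hx : x = 0
    · simp [hx]
    · set d1 := x % 10 with hd1
      set d2 := y % 10 with hd2
      by_cases hc : d1 + d2 < 10
      · have e : x + y = 10 * (x / 10 + y / 10) + (d1 + d2) := by omega
        rw [e, ds_mul10_add _ _ hc]
        have := ih (x / 10) (by omega) (y / 10)
        have e1 : x = 10 * (x / 10) + d1 := by omega
        have e2 : y = 10 * (y / 10) + d2 := by omega
        conv_rhs => rw [e1, e2, ds_mul10_add _ _ (by omega), ds_mul10_add _ _ (by omega)]
        omega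
      · have e : x + y = 10 * (x / 10 + (y / 10 + 1)) + (d1 + d2 - 10) := by omega
        rw [e, ds_mul10_add _ _ (by omega)]
        have h1 := ih (x / 10) (by omega) (y / 10 + 1)
        have h2 := ds_succ_le (y / 10)
        have e1 : x = 10 * (x / 10) + d1 := by omega
        have e2 : y = 10 * (y / 10) + d2 := by omega
        conv_rhs => rw [e1, e2, ds_mul10_add _ _ (by omega), ds_mul10_add _ _ (by omega)]
        omega

-- bridges: the ports on nonnegative ints compute via Nat
theorem mod_cast_pysem (m : Nat) : PySem.Int.mod (m : Int) 10 = ((m % 10 : Nat) : Int) := by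
  simp [PySem.Int.mod, Int.fmod_eq_emod]

theorem div_cast_pysem (m : Nat) : PySem.Int.floordiv (m : Int) 10 = ((m / 10 : Nat) : Int) := by
  simp [PySem.Int.floordiv, Int.fdiv_eq_ediv]

theorem digit_sum_loop_eq (m : Nat) : ∀ s : Int, digit_sum_loop (m : Int) s = s + (ds m : Int) := by
  induction m using Nat.strong_induction_on with
  | _ m ih =>
    intro s
    by_cases hm : m = 0
    · rw [digit_sum_loop.eq_def]
      simp [hm, ds]
    · rw [digit_sum_loop.eq_def, if_pos (by simp; omega), div_cast_pysem, mod_cast_pysem,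
        ih (m / 10) (by omega)]
      conv_rhs => rw [ds, if_neg hm]
      push_cast
      ring

theorem digit_sum_eq (m : Nat) : digit_sum (m : Int) = (ds m : Int) := by
  rw [digit_sum, digit_sum_loop_eq]; ring

-- core: A's digit-pair scan decides exactly whether the digit sums fail to add
theorem main_nat (m1 : Nat) : ∀ m2 : Nat,
    is_carry (m1 : Int) (m2 : Int) = decide (ds m1 + ds m2 ≠ ds (m1 + m2)) := by
  induction m1 using Nat.strong_induction_on with
  | _ m1 ih =>
    intro m2
    by_cases h1 : m1 = 0
    · rw [is_carry, if_neg (by simp; omega)]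
      have hds : ds 0 = 0 := by rw [ds]; simp
      simp [h1, hds]
    · by_cases h2 : m2 = 0
      · rw [is_carry, if_neg (by simp; omega)]
        have hds : ds 0 = 0 := by rw [ds]; simp
        simp [h2, hds]
      · rw [is_carry, if_pos (by simp; omega)]
        simp only [mod_cast_pysem, div_cast_pysem]
        set d1 := m1 % 10 with hd1
        set d2 := m2 % 10 with hd2
        have e1 : m1 = 10 * (m1 / 10) + d1 := by omega
        have e2 : m2 = 10 * (m2 / 10) + d2 := by omega
        by_cases hc : ((d1 : Int) + (d2 : Int) ≥ 10)
        · rw [if_pos (by exact_mod_cast hc)]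
          have hc' : d1 + d2 ≥ 10 := by exact_mod_cast hc
          have e : m1 + m2 = 10 * (m1 / 10 + (m2 / 10 + 1)) + (d1 + d2 - 10) := by omega
          have hs : ds (m1 + m2) = (d1 + d2 - 10) + ds (m1 / 10 + (m2 / 10 + 1)) := by
            rw [e, ds_mul10_add _ _ (by omega)]
          have hle1 := ds_add_le (m1 / 10) (m2 / 10 + 1)
          have hle2 := ds_succ_le (m2 / 10)
          have hm1 : ds m1 = d1 + ds (m1 / 10) := by
            conv_lhs => rw [e1, ds_mul10_add _ _ (by omega)]
          have hm2 : ds m2 = d2 + ds (m2 / 10) := by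
            conv_lhs => rw [e2, ds_mul10_add _ _ (by omega)]
          symm
          rw [decide_eq_true_iff]
          omega
        · rw [if_neg (by exact_mod_cast hc)]
          have hc' : d1 + d2 < 10 := by
            have : ¬ (d1 + d2 ≥ 10) := by intro h; exact hc (by exact_mod_cast h)
            omega
          have e : m1 + m2 = 10 * (m1 / 10 + m2 / 10) + (d1 + d2) := by omega
          have hs : ds (m1 + m2) = (d1 + d2) + ds (m1 / 10 + m2 / 10) := by
            rw [e, ds_mul10_add _ _ hc']
          have hm1 : ds m1 = d1 + ds (m1 / 10) := by
            conv_lhs => rw [e1, ds_mul10_add _ _ (by omega)]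
          have hm2 : ds m2 = d2 + ds (m2 / 10) := by
            conv_lhs => rw [e2, ds_mul10_add _ _ (by omega)]
          rw [ih (m1 / 10) (by omega) (m2 / 10)]
          simp only [decide_eq_decide]
          omega

-- ===== VERDICT (by name: the statement is the Claim_ definition above) =====
theorem is_carry_spec : Claim_equal_is_carry := by
  intro num1 num2 _
  unfold Spec_is_carry
  by_cases h1 : 0 < num1
  · by_cases h2 : 0 < num2
    · unfold is_carry_alt
      rw [if_neg (by simp; omega)]
      have e1 : num1 = (num1.toNat : Int) := by omega
      have e2 : num2 = (num2.toNat : Int) := by omega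
      rw [e1, e2]
      rw [main_nat]
      have esum : (num1.toNat : Int) + (num2.toNat : Int) = ((num1.toNat + num2.toNat : Nat) : Int) := by
        push_cast; ring
      rw [esum, digit_sum_eq, digit_sum_eq, digit_sum_eq]
      simp only [decide_eq_decide]
      constructor
      · intro h hx; exact h (by exact_mod_cast hx)
      · intro h hx; exact h (by exact_mod_cast hx)
    · rw [is_carry, if_neg (by simp; omega)]
      unfold is_carry_alt
      rw [if_pos (by simp; omega)]
  · rw [is_carry, if_neg (by simp; omega)]
    unfold is_carry_alt
    rw [if_pos (by simp; omega)]
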